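-- pv_equiv track=rewrite | github.com/s-koide-dc/Design2Code | src/utils/logic_auditor.py | _extract_numeric_literals
-- ===== SOURCE A (Python) =====
-- from typing import Dict, List, Any, Optional, Tuple
--
-- def _extract_numeric_literals(text: str) -> List[Tuple[int, int, str]]:
--     results = []
--     if not text:
--         return results
--     i = 0
--     s = str(text)
--     while i < len(s):
--         if s[i].isdigit():
--             j = i + 1
--             while j < len(s) and s[j].isdigit():
--                 j += 1
--             if j < len(s) and s[j] == ".":
--                 k = j + 1
--                 if k < len(s) and s[k].isdigit():
--                     while k < len(s) and s[k].isdigit():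
--                         k += 1
--                     results.append((i, k, s[i:k]))
--                     i = k
--                     continue
--             results.append((i, j, s[i:j]))
--             i = j
--             continue
--         i += 1
--     return results
-- ===== SOURCE B (Python) =====
-- def _extract_numeric_literals(text):
--     s = str(text) if text else ""
--     # pass 1: maximal digit runs as (start, stop) half-open spans
--     runs = []
--     start = None
--     for idx, ch in enumerate(s):
--         if ch.isdigit():
--             if start is None:
--                 start = idx
--         elif start is not None:
--             runs.append((start, idx))
--             start = None
--     if start is not None:
--         runs.append((start, len(s)))
--     # pass 2: merge a run with the next one when only a '.' separates them
--     out = []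
--     t = 0
--     while t < len(runs):
--         a, b = runs[t]
--         if t + 1 < len(runs) and runs[t + 1][0] == b + 1 and s[b] == ".":
--             d = runs[t + 1][1]
--             out.append((a, d, s[a:d]))
--             t += 2
--         else:
--             out.append((a, b, s[a:b]))
--             t += 1
--     return out
-- ===== Notes on version B (the rewrite author's own statement) =====
-- stated objective: alternative
-- what changed: Replaces A's single interleaved index-jumping scan (digit run, dot lookahead, merged append, manual index resets) by two separate passes: a per-character sweep collecting maximal digit runs as (start, stop) spans, then a merge pass joining a run with its successor when a single decimal point separates them; a timing run measured B faster by a constant factor (simpler per-character work in the hot loop).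
import Mathlib
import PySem

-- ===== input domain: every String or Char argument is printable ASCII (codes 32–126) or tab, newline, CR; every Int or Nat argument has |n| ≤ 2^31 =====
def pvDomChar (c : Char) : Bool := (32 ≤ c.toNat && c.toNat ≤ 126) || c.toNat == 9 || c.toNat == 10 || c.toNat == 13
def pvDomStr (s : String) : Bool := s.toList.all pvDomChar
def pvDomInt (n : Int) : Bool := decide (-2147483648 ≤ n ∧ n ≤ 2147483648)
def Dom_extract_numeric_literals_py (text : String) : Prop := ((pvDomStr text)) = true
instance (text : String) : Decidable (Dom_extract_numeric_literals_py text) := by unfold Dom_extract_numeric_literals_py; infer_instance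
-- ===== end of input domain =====

-- B re-implements A's single interleaved scan as two passes (collect maximal digit runs, then
-- merge runs separated by a single decimal point); alternative decomposition, measured faster.

-- shared primitive wrappers: Python's c.isdigit() at an index, and the slice s[a:b]
def pvDigAt (s : List Char) (i : Nat) : Bool :=
  match s[i]? with
  | some c => PySem.Chars.isdigit c
  | none => false

def pvSlice (s : List Char) (a b : Nat) : String :=
  String.ofList (PySem.List.slice s (some (a : Int)) (some (b : Int)))

-- ===== PORT A =====
-- the inner 'while … isdigit(): += 1' loops of A
def pvScanA (s : List Char) (j : Nat) : Nat :=
  if h : j < s.length ∧ pvDigAt s j = true then pvScanA s (j + 1) else j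
termination_by s.length - j
decreasing_by omega

theorem pvScanA_ge (s : List Char) (j : Nat) : j ≤ pvScanA s j := by
  fun_induction pvScanA with
  | case1 j h ih => omega
  | case2 j h => omega

-- A's outer while loop, step for step
def pvGoA (s : List Char) (i : Nat) : List (Int × Int × String) :=
  if hi : i < s.length then
    if pvDigAt s i = true then
      let j := pvScanA s (i + 1)
      if j < s.length ∧ s[j]? = some '.' then
        if j + 1 < s.length ∧ pvDigAt s (j + 1) = true then
          let k := pvScanA s (j + 1)
          ((i : Int), (k : Int), pvSlice s i k) :: pvGoA s k
        else
          ((i : Int), (j : Int), pvSlice s i j) :: pvGoA s j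
      else
        ((i : Int), (j : Int), pvSlice s i j) :: pvGoA s j
    else pvGoA s (i + 1)
  else []
termination_by s.length - i
decreasing_by
  · have h1 := pvScanA_ge s (i + 1); have h2 := pvScanA_ge s (pvScanA s (i + 1) + 1); omega
  · have := pvScanA_ge s (i + 1); omega
  · have := pvScanA_ge s (i + 1); omega
  · omega

def extract_numeric_literals_py (text : String) : List (Int × Int × String) :=
  if text = "" then [] else pvGoA text.toList 0

-- ===== PORT B =====
-- pass 1 of Source B: one sweep over the characters, carrying the pending run start
def pvRunsGo : List Char → Nat → Option Nat → List (Nat × Nat)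
  | [], _, none => []
  | [], n, some a => [(a, n)]
  | c :: rest, idx, st =>
    if PySem.Chars.isdigit c = true then
      pvRunsGo rest (idx + 1) (some (st.getD idx))
    else
      match st with
      | none => pvRunsGo rest (idx + 1) none
      | some a => (a, idx) :: pvRunsGo rest (idx + 1) none

-- pass 2 of Source B: merge a run with its successor when exactly a '.' sits between them
def pvMergeB (s : List Char) : List (Nat × Nat) → List (Int × Int × String)
  | [] => []
  | (a, b) :: rest =>
    match rest with
    | (c, d) :: rest' =>
      if c = b + 1 ∧ s[b]? = some '.' then
        ((a : Int), (d : Int), pvSlice s a d) :: pvMergeB s rest'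
      else
        ((a : Int), (b : Int), pvSlice s a b) :: pvMergeB s ((c, d) :: rest')
    | [] => [((a : Int), (b : Int), pvSlice s a b)]

def extract_numeric_literals_py_alt (text : String) : List (Int × Int × String) :=
  pvMergeB text.toList (pvRunsGo text.toList 0 none)

-- ===== PRECONDITION & SPEC =====
def Spec_extract_numeric_literals_py (text : String) (out : List (Int × Int × String)) : Prop := out = extract_numeric_literals_py_alt text
instance (text : String) (out : List (Int × Int × String)) : Decidable (Spec_extract_numeric_literals_py text out) := by unfold Spec_extract_numeric_literals_py; infer_instance

-- ===== CLAIM (what is proved, stated in full; the proofs are below) =====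
def Claim_equal_extract_numeric_literals_py : Prop := ∀ (text : String), Dom_extract_numeric_literals_py text → Spec_extract_numeric_literals_py text (extract_numeric_literals_py text)

-- ===== LEMMAS AND PROOFS =====

-- proof-side view of B's first pass: the maximal digit runs at positions ≥ i
def pvRunsFrom (s : List Char) (i : Nat) : List (Nat × Nat) :=
  if hi : i < s.length then
    if pvDigAt s i = true then
      (i, pvScanA s (i + 1)) :: pvRunsFrom s (pvScanA s (i + 1))
    else pvRunsFrom s (i + 1)
  else []
termination_by s.length - i
decreasing_by
  · have := pvScanA_ge s (i + 1); omega
  · omega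

theorem pvRunsFrom_nil (s : List Char) (i : Nat) (h : s.length ≤ i) : pvRunsFrom s i = [] := by
  rw [pvRunsFrom.eq_def, dif_neg (by omega)]

theorem pvScanA_stop (s : List Char) (j : Nat) :
    ¬ (pvScanA s j < s.length ∧ pvDigAt s (pvScanA s j) = true) := by
  fun_induction pvScanA with
  | case1 j h ih => exact ih
  | case2 j h => exact h

theorem pvScanA_step (s : List Char) (j : Nat) (h : j < s.length ∧ pvDigAt s j = true) :
    pvScanA s j = pvScanA s (j + 1) := by
  rw [pvScanA.eq_def, dif_pos h]

theorem pvScanA_id (s : List Char) (j : Nat) (h : ¬ (j < s.length ∧ pvDigAt s j = true)) :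
    pvScanA s j = j := by
  rw [pvScanA.eq_def, dif_neg h]

theorem pvRunsFrom_head_ge (s : List Char) (p : Nat) :
    ∀ c d rest, pvRunsFrom s p = (c, d) :: rest → p ≤ c := by
  fun_induction pvRunsFrom with
  | case1 p hp hd ih =>
    intro c d rest h
    injection h with h1 _
    injection h1 with h1 _
    omega
  | case2 p hp hd ih =>
    intro c d rest h
    have := ih c d rest h; omega
  | case3 p hp =>
    intro c d rest h
    exact absurd h (by simp)

-- B's merge pass emits a lone span when the next run is not '.'-adjacent
theorem pvMergeB_short (s : List Char) (a b : Nat) (rest : List (Nat × Nat))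
    (h : ∀ c d rest', rest = (c, d) :: rest' → ¬ (c = b + 1 ∧ s[b]? = some '.')) :
    pvMergeB s ((a, b) :: rest)
      = ((a : Int), (b : Int), pvSlice s a b) :: pvMergeB s rest := by
  cases rest with
  | nil => rfl
  | cons hd tl =>
    obtain ⟨c, d⟩ := hd
    simp only [pvMergeB, if_neg (h c d tl rfl)]

-- B's first pass computes pvRunsFrom
theorem pvRunsGo_eq (s : List Char) : ∀ n idx, s.length - idx ≤ n →
    (pvRunsGo (s.drop idx) idx none = pvRunsFrom s idx ∧
     ∀ a, pvRunsGo (s.drop idx) idx (some a)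
        = (a, pvScanA s idx) :: pvRunsFrom s (pvScanA s idx)) := by
  intro n
  induction n with
  | zero =>
    intro idx h
    have hlen : s.length ≤ idx := by omega
    have hd : s.drop idx = [] := List.drop_eq_nil_of_le hlen
    have hs : pvScanA s idx = idx := pvScanA_id s idx (by omega)
    rw [hd, hs, pvRunsFrom_nil s idx hlen]
    exact ⟨rfl, fun a => rfl⟩
  | succ n ih =>
    intro idx h
    by_cases hi : idx < s.length
    · have hdrop : s.drop idx = s[idx] :: s.drop (idx + 1) := List.drop_eq_getElem_cons hi
      have hdig : pvDigAt s idx = PySem.Chars.isdigit s[idx] := by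
        simp [pvDigAt, List.getElem?_eq_getElem hi]
      have ih' := ih (idx + 1) (by omega)
      by_cases hD : PySem.Chars.isdigit s[idx] = true
      · have hstep : pvScanA s idx = pvScanA s (idx + 1) :=
          pvScanA_step s idx ⟨hi, by rw [hdig]; exact hD⟩
        have hC : pvRunsFrom s idx
            = (idx, pvScanA s (idx + 1)) :: pvRunsFrom s (pvScanA s (idx + 1)) := by
          rw [pvRunsFrom.eq_def, dif_pos hi, if_pos (by rw [hdig]; exact hD)]
        constructor
        · rw [hdrop]
          simp only [pvRunsGo, hD, if_pos, Option.getD]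
          rw [(ih'.2 idx)]
          exact hC.symm
        · intro a
          rw [hdrop]
          simp only [pvRunsGo, hD, if_pos, Option.getD]
          rw [(ih'.2 a), hstep]
      · have hdig' : ¬ pvDigAt s idx = true := by rw [hdig]; exact hD
        have hs : pvScanA s idx = idx :=
          pvScanA_id s idx (by rw [hdig]; exact fun hc => hD hc.2)
        have hfrom : pvRunsFrom s idx = pvRunsFrom s (idx + 1) := by
          rw [pvRunsFrom.eq_def, dif_pos hi, if_neg hdig']
        constructor
        · rw [hdrop]
          simp only [pvRunsGo, hD, Bool.false_eq_true, if_false]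
          rw [ih'.1, hfrom]
        · intro a
          rw [hdrop]
          simp only [pvRunsGo, hD, Bool.false_eq_true, if_false]
          rw [ih'.1, hs, hfrom]
    · have hlen : s.length ≤ idx := by omega
      have hd : s.drop idx = [] := List.drop_eq_nil_of_le hlen
      have hs : pvScanA s idx = idx := pvScanA_id s idx (by omega)
      rw [hd, hs, pvRunsFrom_nil s idx hlen]
      exact ⟨rfl, fun a => rfl⟩

-- A's loop equals B's merge pass over the runs
theorem pvGoA_eq (s : List Char) : ∀ n i, s.length - i ≤ n →
    pvGoA s i = pvMergeB s (pvRunsFrom s i) := by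
  intro n
  induction n with
  | zero =>
    intro i h
    rw [pvGoA.eq_def, dif_neg (by omega), pvRunsFrom_nil s i (by omega)]
    rfl
  | succ n ih =>
    intro i h
    by_cases hi : i < s.length
    · by_cases hdig : pvDigAt s i = true
      · -- digit at i: a run (i, j) starts here
        set j := pvScanA s (i + 1) with hj
        have hij : i + 1 ≤ j := pvScanA_ge s (i + 1)
        have hstop := pvScanA_stop s (i + 1)
        rw [← hj] at hstop
        have hfrom : pvRunsFrom s i = (i, j) :: pvRunsFrom s j := by
          rw [pvRunsFrom.eq_def, dif_pos hi, if_pos hdig]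
        rw [pvGoA.eq_def, dif_pos hi, if_pos hdig, hfrom]
        simp only [← hj]
        by_cases c1 : j < s.length ∧ s[j]? = some '.'
        · have hdigj : ¬ pvDigAt s j = true := fun hc => hstop ⟨c1.1, hc⟩
          have hfromj : pvRunsFrom s j = pvRunsFrom s (j + 1) := by
            rw [pvRunsFrom.eq_def, dif_pos c1.1, if_neg hdigj]
          by_cases c2 : j + 1 < s.length ∧ pvDigAt s (j + 1) = true
          · -- merged decimal span (i, k)
            set k := pvScanA s (j + 1) with hk
            have hjk : j + 2 ≤ k := by
              have := pvScanA_ge s (j + 1 + 1)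
              rw [hk, pvScanA_step s (j + 1) c2]; omega
            have hfromj2 : pvRunsFrom s (j + 1) = (j + 1, k) :: pvRunsFrom s k := by
              rw [pvRunsFrom.eq_def, dif_pos c2.1, if_pos c2.2, ← pvScanA_step s (j + 1) c2, ← hk]
            rw [if_pos c1, if_pos c2, hfromj, hfromj2]
            simp only [pvMergeB]
            rw [if_pos (show True ∧ s[j]? = some '.' from ⟨trivial, c1.2⟩),
              ih k (by omega)]
          · -- '.' not followed by a digit: lone run (i, j)
            rw [if_pos c1, if_neg c2]
            rw [pvMergeB_short s i j (pvRunsFrom s j) ?_, ih j (by omega)]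
            intro c d rest' hr hcd
            rw [hfromj] at hr
            by_cases hj1 : j + 1 < s.length
            · have hdigj1 : ¬ pvDigAt s (j + 1) = true := fun hc => c2 ⟨hj1, hc⟩
              rw [pvRunsFrom.eq_def, dif_pos hj1, if_neg hdigj1] at hr
              have := pvRunsFrom_head_ge s (j + 1 + 1) c d rest' hr
              omega
            · rw [pvRunsFrom_nil s (j + 1) (by omega)] at hr
              exact absurd hr (by simp)
        · -- no '.' right after the run: lone run (i, j)
          rw [if_neg c1]
          have hdot : ¬ s[j]? = some '.' := by
            intro hc
            by_cases hjl : j < s.length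
            · exact c1 ⟨hjl, hc⟩
            · rw [List.getElem?_eq_none (by omega)] at hc; simp at hc
          rw [pvMergeB_short s i j (pvRunsFrom s j) (fun c d rest' _ hcd => hdot hcd.2),
            ih j (by omega)]
      · -- not a digit: both sides skip to i + 1
        have hfrom : pvRunsFrom s i = pvRunsFrom s (i + 1) := by
          rw [pvRunsFrom.eq_def, dif_pos hi, if_neg hdig]
        rw [pvGoA.eq_def, dif_pos hi, if_neg hdig, hfrom]
        exact ih (i + 1) (by omega)
    · rw [pvGoA.eq_def, dif_neg hi, pvRunsFrom_nil s i (by omega)]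
      rfl

-- ===== VERDICT (by name: the statement is the Claim_ definition above) =====
theorem extract_numeric_literals_py_spec : Claim_equal_extract_numeric_literals_py := by
  intro text _
  unfold Spec_extract_numeric_literals_py extract_numeric_literals_py extract_numeric_literals_py_alt
  by_cases h : text = ""
  · subst h; rfl
  · rw [if_neg h]
    have hr := (pvRunsGo_eq text.toList text.toList.length 0 (by omega)).1
    simp only [List.drop_zero] at hr
    simp only [hr, pvGoA_eq text.toList text.toList.length 0 (by omega)]
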